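-- pv_equiv track=rewrite | github.com/shallinan1/OpaqueToolsBench | src/datasets/BrowseCompPlus/generate_improved_descriptions.py | _aggregate_batch_descriptions
-- ===== SOURCE A (Python) =====
-- from collections import Counter, defaultdict
-- from typing import Dict, List, Optional, Tuple
--
-- def _aggregate_batch_descriptions(llm_responses: List[Dict]) -> Dict[str, str]:
--     by_tool: Dict[str, List[str]] = defaultdict(list)
--     for response in llm_responses:
--         parsed = response.get("parsed_descriptions", {})
--         for tool_name, description in parsed.items():
--             if description:
--                 by_tool[tool_name].append(description)
--
--     aggregated: Dict[str, str] = {}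
--     for tool_name, candidates in by_tool.items():
--         most_common = Counter(candidates).most_common(1)
--         if most_common:
--             aggregated[tool_name] = most_common[0][0]
--
--     return aggregated
-- ===== SOURCE B (Python) =====
-- from typing import Dict, List
--
--
-- def _aggregate_batch_descriptions(llm_responses: List[Dict]) -> Dict[str, str]:
--     # Flatten once to a (tool, description) pair list, then for each tool (in
--     # first-appearance order) pick the description maximising its occurrence
--     # count among that tool's descriptions by direct scanning (max with
--     # key=list.count returns the first maximal element, which coincides with
--     # Counter.most_common(1)'s earliest-first-occurrence tie-break).
--     pairs = [(tool, desc)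
--              for response in llm_responses
--              for tool, desc in response.get("parsed_descriptions", {}).items()
--              if desc]
--     aggregated: Dict[str, str] = {}
--     for tool, _ in pairs:
--         if tool not in aggregated:
--             descs = [d for t, d in pairs if t == tool]
--             aggregated[tool] = max(descs, key=descs.count)
--     return aggregated
-- ===== Notes on version B (the rewrite author's own statement) =====
-- stated objective: alternative
-- what changed: A groups descriptions per tool into lists with a defaultdict and then builds a Counter and calls most_common(1) per tool; B flattens everything once into a (tool, description) pair list and, for each tool in first-appearance order, picks the winner by a brute-force scan max(descs, key=descs.count) with no counting dictionaries at all (max with key returns the first maximal element, matching Counter.most_common(1)'s earliest-first-occurrence tie-break).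
import Mathlib
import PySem

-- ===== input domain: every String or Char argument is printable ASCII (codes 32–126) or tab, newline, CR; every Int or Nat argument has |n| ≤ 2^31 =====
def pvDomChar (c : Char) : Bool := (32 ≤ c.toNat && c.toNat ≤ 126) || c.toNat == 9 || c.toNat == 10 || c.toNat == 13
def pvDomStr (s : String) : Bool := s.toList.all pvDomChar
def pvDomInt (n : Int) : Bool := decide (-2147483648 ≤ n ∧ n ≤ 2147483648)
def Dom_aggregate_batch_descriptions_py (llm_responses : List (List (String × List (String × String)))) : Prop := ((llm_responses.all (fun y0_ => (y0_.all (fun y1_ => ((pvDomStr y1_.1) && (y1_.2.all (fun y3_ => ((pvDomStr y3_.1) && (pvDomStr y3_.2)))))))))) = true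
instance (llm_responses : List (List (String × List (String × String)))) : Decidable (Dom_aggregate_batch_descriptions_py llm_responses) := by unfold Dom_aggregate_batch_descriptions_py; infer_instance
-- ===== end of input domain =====

-- B replaces A's group-into-lists-then-Counter-then-most_common pipeline by a flatten-once,
-- brute-force scan: for each tool in first-appearance order, max(descs, key=descs.count);
-- objective: alternative algorithm (no counting dictionaries), return value proved identical.

-- ===== PORT A =====
def aggregate_batch_descriptions_py (llm_responses : List (List (String × List (String × String)))) : List (String × String) :=
  -- by_tool: defaultdict(list); append description when truthy (nonempty)
  let by_tool : PySem.Dict String (List String) :=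
    llm_responses.foldl (fun d response =>
      ((PySem.Dict.mk response).getD "parsed_descriptions" []).foldl
        (fun d td => if td.2 ≠ "" then d.modify td.1 [] (fun x => x ++ [td.2]) else d) d)
      PySem.Dict.empty
  -- Counter(candidates).most_common(1): stable sort of the counter items by count, descending
  let aggregated : PySem.Dict String String :=
    by_tool.items.foldl (fun agg tc =>
      let most_common := (PySem.List.sorted (PySem.Dict.counter tc.2).items (fun p => p.2) true).take 1
      match most_common with
      | m :: _ => agg.insert tc.1 m.1
      | [] => agg) PySem.Dict.empty
  aggregated.items

-- ===== PORT B =====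
def aggregate_batch_descriptions_py_alt (llm_responses : List (List (String × List (String × String)))) : List (String × String) :=
  -- pairs: one flat list of (tool, description) with truthy description
  let pairs : List (String × String) :=
    llm_responses.flatMap (fun response =>
      ((PySem.Dict.mk response).getD "parsed_descriptions" []).filter (fun td => !(td.2 == "")))
  -- for tool, _ in pairs: if tool not in aggregated: scan pairs for this tool's
  -- descriptions and take max(descs, key=descs.count)
  (pairs.foldl (fun (aggregated : PySem.Dict String String) p =>
      if !(aggregated.contains p.1) then
        let descs := (pairs.filter (fun q => q.1 == p.1)).map (fun q => q.2)
        match PySem.List.max? descs (fun d => PySem.List.count descs d) with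
        | some m => aggregated.insert p.1 m
        | none => aggregated  -- unreachable: descs contains p.2, and Python's max never sees an empty list here
      else aggregated) PySem.Dict.empty).items

-- ===== PRECONDITION & SPEC =====
def Spec_aggregate_batch_descriptions_py (llm_responses : List (List (String × List (String × String)))) (out : List (String × String)) : Prop := out = aggregate_batch_descriptions_py_alt llm_responses
instance (llm_responses : List (List (String × List (String × String)))) (out : List (String × String)) : Decidable (Spec_aggregate_batch_descriptions_py llm_responses out) := by unfold Spec_aggregate_batch_descriptions_py; infer_instance

-- ===== CLAIM (what is proved, stated in full; the proofs are below) =====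
def Claim_equal_aggregate_batch_descriptions_py : Prop := ∀ (llm_responses : List (List (String × List (String × String)))), Dom_aggregate_batch_descriptions_py llm_responses → Spec_aggregate_batch_descriptions_py llm_responses (aggregate_batch_descriptions_py llm_responses)

-- ===== LEMMAS AND PROOFS =====

-- the stream of (tool, description) pairs with nonempty description, in encounter order
def pvPairs (llm_responses : List (List (String × List (String × String)))) : List (String × String) :=
  llm_responses.flatMap (fun r =>
    ((PySem.Dict.mk r).getD "parsed_descriptions" []).filter (fun td => !(td.2 == "")))

-- the descriptions filed under tool k, in order
def pvDescs (P : List (String × String)) (k : String) : List String :=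
  (P.filter (fun p => p.1 == k)).map (fun p => p.2)

-- the per-tool winner: first description with maximal multiplicity
def pvWin (l : List String) : String :=
  match PySem.List.max? l (fun d => PySem.List.count l d) with
  | some m => m
  | none => ""

-- the common normal form of both outputs
def pvOut (P : List (String × String)) : List (String × String) :=
  (PySem.Set.ofList (P.map Prod.fst)).map (fun k => (k, pvWin (pvDescs P k)))

-- A's outer double loop is a fold of its step over the flattened filtered pair stream
theorem pv_flatten {D : Type} (f : D → (String × String) → D) (init : D)
    (llm_responses : List (List (String × List (String × String)))) :
    llm_responses.foldl (fun d r =>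
      ((PySem.Dict.mk r).getD "parsed_descriptions" []).foldl
        (fun d td => if td.2 ≠ "" then f d td else d) d) init
      = (pvPairs llm_responses).foldl f init := by
  induction llm_responses generalizing init with
  | nil => rfl
  | cons r rest ih =>
      simp only [List.foldl_cons, pvPairs, List.flatMap_cons, List.foldl_append, ih]
      congr 1
      rw [List.foldl_filter]
      refine PySem.List.foldl_congr_mem _ _ _ _ (fun acc x _ => ?_)
      by_cases h : x.2 = "" <;> simp [h]

-- Python's first-maximum as an online fold
def pvFM {α κ : Type} [LT κ] [DecidableLT κ] (key : α → κ) : Option α → α → Option α :=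
  fun o x => match o with
             | none => some x
             | some m => if key m < key x then some x else some m

theorem pv_head?_insertBy {α κ : Type} [LT κ] [DecidableLT κ] (key : α → κ)
    (x : α) (acc : List α) :
    (PySem.List.insertBy (fun a b => decide (key b < key a)) x acc).head?
      = some (match acc.head? with
              | none => x
              | some m => if key m < key x then x else m) := by
  cases acc with
  | nil => rfl
  | cons y ys =>
      simp only [PySem.List.insertBy]
      by_cases h : key y < key x <;> simp [h]

theorem pv_head?_foldl_insertBy {α κ : Type} [LT κ] [DecidableLT κ] (key : α → κ)
    (rest : List α) :
    ∀ acc : List α,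
      (rest.foldl (fun a x => PySem.List.insertBy (fun a b => decide (key b < key a)) x a) acc).head?
        = rest.foldl (pvFM key) acc.head? := by
  induction rest with
  | nil => intro _; rfl
  | cons x r ih =>
      intro acc
      rw [List.foldl_cons, List.foldl_cons, ih, pv_head?_insertBy]
      cases acc.head? with
      | none => rfl
      | some m => by_cases h : key m < key x <;> simp [pvFM, h]

-- head of the reverse-stable-sorted list = Python max with key (first maximal element)
theorem pv_head?_sorted_rev_eq_max? {α κ : Type} [LT κ] [DecidableLT κ]
    (xs : List α) (key : α → κ) :
    (PySem.List.sorted xs key true).head? = PySem.List.max? xs key :=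
  pv_head?_foldl_insertBy key xs []

theorem pvMax?_eq_foldl {α κ : Type} [LT κ] [DecidableLT κ] (xs : List α) (key : α → κ) :
    PySem.List.max? xs key = xs.foldl (pvFM key) none :=
  (pv_head?_sorted_rev_eq_max? xs key).symm.trans (pv_head?_foldl_insertBy key xs [])

theorem pvMax?_append_singleton {α κ : Type} [LT κ] [DecidableLT κ]
    (xs : List α) (x : α) (key : α → κ) :
    PySem.List.max? (xs ++ [x]) key = pvFM key (PySem.List.max? xs key) x := by
  rw [pvMax?_eq_foldl, pvMax?_eq_foldl, List.foldl_append]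
  rfl

-- first-max commutes with map
theorem pvFoldFM_map {α β κ : Type} [LT κ] [DecidableLT κ] (key : β → κ) (g : α → β) :
    ∀ (xs : List α) (o : Option α),
      xs.foldl (fun acc x => pvFM key acc (g x)) (o.map g)
        = (xs.foldl (pvFM (fun x => key (g x))) o).map g := by
  intro xs
  induction xs with
  | nil => intro o; rfl
  | cons x r ih =>
      intro o
      rw [List.foldl_cons, List.foldl_cons]
      have h : pvFM key (o.map g) (g x) = (pvFM (fun x => key (g x)) o x).map g := by
        cases o with
        | none => rfl
        | some m => by_cases h : key (g m) < key (g x) <;> simp [pvFM, h]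
      rw [h, ih]

theorem pvMax?_map {α β κ : Type} [LT κ] [DecidableLT κ] (key : β → κ) (g : α → β)
    (xs : List α) :
    PySem.List.max? (xs.map g) key = (PySem.List.max? xs (fun x => key (g x))).map g := by
  rw [pvMax?_eq_foldl, pvMax?_eq_foldl, List.foldl_map]
  exact pvFoldFM_map key g xs none

-- two keys inducing the same strict comparisons induce the same first maximum
theorem pvMax?_congr_lt {α κ1 κ2 : Type} [LT κ1] [DecidableLT κ1] [LT κ2] [DecidableLT κ2]
    (k1 : α → κ1) (k2 : α → κ2) (h : ∀ a b, k1 a < k1 b ↔ k2 a < k2 b) (xs : List α) :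
    PySem.List.max? xs k1 = PySem.List.max? xs k2 := by
  rw [pvMax?_eq_foldl, pvMax?_eq_foldl]
  have hfm : pvFM k1 = pvFM k2 := by
    funext o x
    cases o with
    | none => rfl
    | some m =>
        simp only [pvFM]
        by_cases hc : k1 m < k1 x
        · rw [if_pos hc, if_pos ((h m x).mp hc)]
        · rw [if_neg hc, if_neg (fun hc2 => hc ((h m x).mpr hc2))]
  rw [hfm]

-- dropping later duplicates does not change the first maximum
theorem pvMax?_dedup {α : Type} [BEq α] [LawfulBEq α] (key : α → Int) (l : List α) :
    PySem.List.max? (PySem.Set.ofList l) key = PySem.List.max? l key := by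
  induction l using List.reverseRecOn with
  | nil => rfl
  | append_singleton l x ih =>
      rw [PySem.Set.ofList_append_singleton, pvMax?_append_singleton]
      by_cases hx : x ∈ PySem.Set.ofList l
      · rw [PySem.Set.add_of_mem hx, ih]
        have hxl : x ∈ l := (PySem.Set.mem_ofList _ _).mp hx
        obtain ⟨m, hm⟩ : ∃ m, PySem.List.max? l key = some m := by
          cases h : PySem.List.max? l key with
          | none =>
              rw [PySem.List.max?_eq_none_iff] at h
              subst h; exact absurd hxl (List.not_mem_nil)
          | some m => exact ⟨m, rfl⟩
        have hle : key x ≤ key m := PySem.List.max?_isMax hm x hxl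
        rw [hm]
        simp [pvFM, not_lt.mpr hle]
      · rw [PySem.Set.add_of_not_mem hx, pvMax?_append_singleton, ih]

-- A's per-tool step (head of the count-sorted counter items) inserts pvWin
theorem pv_stepA (k : String) (l : List String) (h : l ≠ [])
    (agg : PySem.Dict String String) :
    (match (PySem.List.sorted (PySem.Dict.counter l).items (fun p => p.2) true).take 1 with
     | m :: _ => agg.insert k m.1
     | [] => agg)
      = agg.insert k (pvWin l) := by
  have hchain : PySem.List.max? (PySem.Dict.counter l).items (fun p => p.2)
      = (PySem.List.max? l (fun d => PySem.List.count l d)).map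
          (fun c => (c, (l.count c : Int))) := by
    rw [PySem.Dict.items_counter, pvMax?_map, pvMax?_dedup]
    rw [pvMax?_congr_lt (fun x : String => ((x, (l.count x : Int)) : String × Int).2)
          (fun d => PySem.List.count l d)
          (fun a b => by
            show ((l.count a : Nat) : Int) < ((l.count b : Nat) : Int)
                ↔ l.count a < l.count b
            exact Nat.cast_lt) l]
  obtain ⟨c, hc⟩ : ∃ c, PySem.List.max? l (fun d => PySem.List.count l d) = some c := by
    cases hm : PySem.List.max? l (fun d => PySem.List.count l d) with
    | none => rw [PySem.List.max?_eq_none_iff] at hm; exact absurd hm h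
    | some c => exact ⟨c, rfl⟩
  have hmax : PySem.List.max? (PySem.Dict.counter l).items (fun p => p.2)
      = some (c, (l.count c : Int)) := by rw [hchain, hc]; rfl
  have hhead := pv_head?_sorted_rev_eq_max? (PySem.Dict.counter l).items (fun p => p.2)
  rw [hmax] at hhead
  obtain ⟨m, t, hst⟩ : ∃ m t, PySem.List.sorted (PySem.Dict.counter l).items
      (fun p => p.2) true = m :: t := by
    cases hs : PySem.List.sorted (PySem.Dict.counter l).items (fun p => p.2) true with
    | nil => rw [hs] at hhead; exact absurd hhead (by simp)
    | cons m t => exact ⟨m, t, rfl⟩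
  rw [hst] at hhead ⊢
  have hm : m = (c, (l.count c : Int)) := by simpa using hhead
  have hwin : pvWin l = c := by unfold pvWin; rw [hc]
  rw [hm, hwin]
  rfl

-- B's per-tool step inserts pvWin as well
theorem pv_stepB (k : String) (l : List String) (h : l ≠ [])
    (agg : PySem.Dict String String) :
    (match PySem.List.max? l (fun d => PySem.List.count l d) with
     | some m => agg.insert k m
     | none => agg)
      = agg.insert k (pvWin l) := by
  cases hm : PySem.List.max? l (fun d => PySem.List.count l d) with
  | none => rw [PySem.List.max?_eq_none_iff] at hm; exact absurd hm h
  | some c => unfold pvWin; rw [hm]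

-- descriptions of a tool that occurs in the stream form a nonempty list
theorem pv_descs_ne (P : List (String × String)) (k : String) (hk : k ∈ P.map Prod.fst) :
    pvDescs P k ≠ [] := by
  obtain ⟨v, hv⟩ : ∃ v, (k, v) ∈ P := by simpa using hk
  intro he
  have hmem : (k, v) ∈ P.filter (fun p => p.1 == k) := List.mem_filter.mpr ⟨hv, by simp⟩
  unfold pvDescs at he
  rw [List.map_eq_nil_iff.mp he] at hmem
  exact absurd hmem (List.not_mem_nil)

-- a fold inserting a fresh value f k under each distinct key lists exactly (k, f k)
theorem pv_items_plain (f : String → String) (ks : List String) :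
    ((PySem.Set.ofList ks).foldl (fun agg k => agg.insert k (f k)) PySem.Dict.empty).items
      = (PySem.Set.ofList ks).map (fun k => (k, f k)) := by
  have := PySem.Dict.items_foldl_insert_fresh (l := PySem.Set.ofList ks)
    (k := fun a => a) (v := f) (d := PySem.Dict.empty)
    (by intro a _; exact PySem.Dict.contains_empty a)
    (by simp)
  simpa using this

-- the guarded fold's keys: every key of the stream, first occurrences in order
theorem pvG_keys (f : String → String) (ks : List String) :
    ∀ out : PySem.Dict String String,
      (ks.foldl (fun out k => if !(out.contains k) then out.insert k (f k) else out) out).keys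
        = PySem.Set.update out.keys ks := by
  induction ks with
  | nil => intro out; simp [PySem.Set.update]
  | cons k rest ih =>
      intro out
      rw [List.foldl_cons, PySem.Set.update_cons]
      by_cases h : out.contains k = true
      · have hk : k ∈ out.keys := (PySem.Dict.contains_iff_mem_keys _ _).mp h
        have hstep : (if !(out.contains k) then out.insert k (f k) else out) = out := by
          simp [h]
        rw [hstep, ih, PySem.Set.add_of_mem hk]
      · have h' : out.contains k = false := by revert h; cases out.contains k <;> simp
        have hk : k ∉ out.keys := fun hm => by
          rw [(PySem.Dict.contains_iff_mem_keys _ _).mpr hm] at h'; cases h'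
        have hstep : (if !(out.contains k) then out.insert k (f k) else out)
            = out.insert k (f k) := by simp [h']
        have hkeys : (out.insert k (f k)).keys = out.keys ++ [k] :=
          PySem.Dict.keys_insert_of_not_contains _ _ h'
        rw [hstep, ih, hkeys, PySem.Set.add_of_not_mem hk]

-- the guarded fold's lookups: f k for every newly seen key
theorem pvG_getD (f : String → String) (ks : List String) :
    ∀ (out : PySem.Dict String String) (k0 : String),
      (ks.foldl (fun out k => if !(out.contains k) then out.insert k (f k) else out) out).getD k0 ""
        = if k0 ∈ ks ∧ out.contains k0 = false then f k0 else out.getD k0 "" := by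
  induction ks with
  | nil => intro out k0; simp
  | cons k rest ih =>
      intro out k0
      rw [List.foldl_cons]
      by_cases h : out.contains k = true
      · have hstep : (if !(out.contains k) then out.insert k (f k) else out) = out := by
          simp [h]
        rw [hstep, ih]
        have hiff : (k0 ∈ rest ∧ out.contains k0 = false)
            ↔ (k0 ∈ k :: rest ∧ out.contains k0 = false) := by
          constructor
          · rintro ⟨h1, h2⟩; exact ⟨List.mem_cons_of_mem _ h1, h2⟩
          · rintro ⟨h1, h2⟩
            rcases List.mem_cons.mp h1 with h1 | h1
            · subst h1; rw [h2] at h; cases h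
            · exact ⟨h1, h2⟩
        rw [if_congr hiff rfl rfl]
      · have h' : out.contains k = false := by revert h; cases out.contains k <;> simp
        have hstep : (if !(out.contains k) then out.insert k (f k) else out)
            = out.insert k (f k) := by simp [h']
        rw [hstep, ih]
        by_cases hk : k0 = k
        · subst hk
          rw [if_neg (by simp),
              if_pos ⟨by exact List.mem_cons_self, h'⟩]
          simp [PySem.Dict.getD_insert_self]
        · have hci : (out.insert k (f k)).contains k0 = out.contains k0 := by
            rw [PySem.Dict.contains_insert]; simp [hk]
          have hgi : (out.insert k (f k)).getD k0 "" = out.getD k0 "" :=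
            PySem.Dict.getD_insert_of_ne _ _ _ hk
          rw [hci, hgi]
          have hiff : (k0 ∈ rest ∧ out.contains k0 = false)
              ↔ (k0 ∈ k :: rest ∧ out.contains k0 = false) := by
            constructor
            · rintro ⟨h1, h2⟩; exact ⟨List.mem_cons_of_mem _ h1, h2⟩
            · rintro ⟨h1, h2⟩
              rcases List.mem_cons.mp h1 with h1 | h1
              · exact absurd h1 hk
              · exact ⟨h1, h2⟩
          rw [if_congr hiff rfl rfl]

-- the guarded fold from empty lists exactly (k, f k) over the distinct keys in order
theorem pv_items_guarded (f : String → String) (ks : List String) :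
    ((ks.foldl (fun out k => if !(out.contains k) then out.insert k (f k) else out)
        PySem.Dict.empty)).items
      = (PySem.Set.ofList ks).map (fun k => (k, f k)) := by
  have hkeys := pvG_keys f ks PySem.Dict.empty
  rw [show (PySem.Dict.empty : PySem.Dict String String).keys = [] from rfl,
      PySem.Set.update_nil_left] at hkeys
  have hnd : ((ks.foldl (fun out k => if !(out.contains k) then out.insert k (f k) else out)
      PySem.Dict.empty)).keys.Nodup := by rw [hkeys]; exact PySem.Set.nodup_ofList ks
  rw [PySem.Dict.items_eq_map_keys _ hnd "", hkeys]
  refine List.map_congr_left (fun k hk => ?_)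
  have hks : k ∈ ks := (PySem.Set.mem_ofList _ _).mp hk
  rw [pvG_getD, if_pos ⟨hks, PySem.Dict.contains_empty k⟩]

-- A's post-flatten tail equals the normal form
theorem pvA_nf (P : List (String × String)) :
    ((P.foldl (fun d td => d.modify td.1 [] (fun x => x ++ [td.2]))
        PySem.Dict.empty).items.foldl (fun agg tc =>
          match (PySem.List.sorted (PySem.Dict.counter tc.2).items (fun p => p.2) true).take 1 with
          | m :: _ => agg.insert tc.1 m.1
          | [] => agg) PySem.Dict.empty).items
      = pvOut P := by
  have hnd : (P.foldl (fun d td => d.modify td.1 [] (fun x => x ++ [td.2]))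
      (PySem.Dict.empty : PySem.Dict String (List String))).keys.Nodup :=
    PySem.Dict.nodup_keys_foldl_modify_key P (fun td => td.1) []
      (fun _ td x => x ++ [td.2]) _ (by simp)
  have hk : (P.foldl (fun d td => d.modify td.1 [] (fun x => x ++ [td.2]))
      (PySem.Dict.empty : PySem.Dict String (List String))).keys
      = PySem.Set.ofList (P.map (fun td => td.1)) := by
    have := PySem.Dict.keys_foldl_modify_key P (fun td => td.1) []
      (fun _ td x => x ++ [td.2]) PySem.Dict.empty
    rw [this, show (PySem.Dict.empty : PySem.Dict String (List String)).keys = [] from rfl,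
        PySem.Set.update_nil_left]
  rw [PySem.Dict.items_eq_map_keys _ hnd [], hk, List.foldl_map]
  have hfold : (PySem.Set.ofList (P.map (fun td => td.1))).foldl
      (fun agg k =>
        match (PySem.List.sorted (PySem.Dict.counter
            ((P.foldl (fun d td => d.modify td.1 [] (fun x => x ++ [td.2]))
              PySem.Dict.empty).getD k [])).items (fun p => p.2) true).take 1 with
        | m :: _ => agg.insert k m.1
        | [] => agg) PySem.Dict.empty
      = (PySem.Set.ofList (P.map (fun td => td.1))).foldl
          (fun agg k => agg.insert k (pvWin (pvDescs P k))) PySem.Dict.empty := by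
    refine PySem.List.foldl_congr_mem _ _ _ _ (fun agg k hk' => ?_)
    have hd : (P.foldl (fun d td => d.modify td.1 [] (fun x => x ++ [td.2]))
        PySem.Dict.empty).getD k [] = pvDescs P k := by
      rw [PySem.Dict.getD_foldl_modify_append]
      simp [pvDescs]
    have hne : pvDescs P k ≠ [] :=
      pv_descs_ne P k (by simpa using (PySem.Set.mem_ofList _ _).mp hk')
    rw [hd]
    exact pv_stepA k _ hne agg
  rw [hfold]
  unfold pvOut
  exact pv_items_plain (fun k => pvWin (pvDescs P k)) (P.map Prod.fst)

-- B's whole computation over the pair stream equals the normal form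
theorem pvB_nf (P : List (String × String)) :
    ((P.foldl (fun (aggregated : PySem.Dict String String) p =>
        if !(aggregated.contains p.1) then
          match PySem.List.max? ((P.filter (fun q => q.1 == p.1)).map (fun q => q.2))
              (fun d => PySem.List.count ((P.filter (fun q => q.1 == p.1)).map (fun q => q.2)) d) with
          | some m => aggregated.insert p.1 m
          | none => aggregated
        else aggregated) PySem.Dict.empty)).items
      = pvOut P := by
  have hcongr : P.foldl (fun (aggregated : PySem.Dict String String) p =>
        if !(aggregated.contains p.1) then
          match PySem.List.max? ((P.filter (fun q => q.1 == p.1)).map (fun q => q.2))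
              (fun d => PySem.List.count ((P.filter (fun q => q.1 == p.1)).map (fun q => q.2)) d) with
          | some m => aggregated.insert p.1 m
          | none => aggregated
        else aggregated) PySem.Dict.empty
      = P.foldl (fun (aggregated : PySem.Dict String String) p =>
          if !(aggregated.contains p.1) then aggregated.insert p.1 (pvWin (pvDescs P p.1))
          else aggregated) PySem.Dict.empty := by
    refine PySem.List.foldl_congr_mem _ _ _ _ (fun agg p hp => ?_)
    have hne : pvDescs P p.1 ≠ [] :=
      pv_descs_ne P p.1 (List.mem_map_of_mem hp)
    by_cases h : agg.contains p.1 = false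
    · rw [h]
      simpa using pv_stepB p.1 (pvDescs P p.1) hne agg
    · rw [eq_true_of_ne_false h]; rfl
  rw [hcongr]
  have hmap : P.foldl (fun (aggregated : PySem.Dict String String) p =>
        if !(aggregated.contains p.1) then aggregated.insert p.1 (pvWin (pvDescs P p.1))
        else aggregated) PySem.Dict.empty
      = (P.map Prod.fst).foldl (fun (aggregated : PySem.Dict String String) k =>
          if !(aggregated.contains k) then aggregated.insert k (pvWin (pvDescs P k))
          else aggregated) PySem.Dict.empty := by
    rw [List.foldl_map]
  rw [hmap, pv_items_guarded]
  rfl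

theorem pv_main (llm_responses : List (List (String × List (String × String)))) :
    aggregate_batch_descriptions_py llm_responses
      = aggregate_batch_descriptions_py_alt llm_responses := by
  simp only [aggregate_batch_descriptions_py, aggregate_batch_descriptions_py_alt]
  rw [pv_flatten]
  exact (pvA_nf (pvPairs llm_responses)).trans (pvB_nf (pvPairs llm_responses)).symm

-- ===== VERDICT (by name: the statement is the Claim_ definition above) =====
theorem aggregate_batch_descriptions_py_spec : Claim_equal_aggregate_batch_descriptions_py := by
  intro llm_responses _
  show _ = _
  exact pv_main llm_responses
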